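-- pv_equiv track=rewrite | github.com/sydashir/Project_hunter | core/intelligence/timing_analyzer.py | _get_daily_distribution
-- ===== SOURCE A (Python) =====
-- from typing import Dict, List
-- from collections import defaultdict, Counter
--
-- def _get_daily_distribution(publish_days: List[int]) -> Dict[str, int]:
--     """Get distribution by day of week"""
--     if not publish_days:
--         return {}
--
--     day_names = ["Monday", "Tuesday", "Wednesday", "Thursday", "Friday", "Saturday", "Sunday"]
--     day_counts = Counter(publish_days)
--
--     distribution = {}
--     for i, day_name in enumerate(day_names):
--         distribution[day_name] = day_counts.get(i, 0)
--
--     return distribution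
-- ===== SOURCE B (Python) =====
-- from typing import Dict, List
--
-- def _get_daily_distribution(publish_days: List[int]) -> Dict[str, int]:
--     """Get distribution by day of week"""
--     if not publish_days:
--         return {}
--     day_names = ["Monday", "Tuesday", "Wednesday", "Thursday", "Friday", "Saturday", "Sunday"]
--     s = sorted(publish_days)
--     n = len(s)
--     distribution = {}
--     j = 0
--     for i, name in enumerate(day_names):
--         # advance past values below i (also passes over negatives / leftovers)
--         while j < n and s[j] < i:
--             j += 1
--         start = j
--         # walk the run of i's
--         while j < n and s[j] == i:
--             j += 1
--         distribution[name] = j - start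
--     return distribution
-- ===== Notes on version B (the rewrite author's own statement) =====
-- stated objective: alternative
-- what changed: Replaced the Counter hash-frequency table plus per-name .get lookup by sort-then-linear-sweep: sort the days once, then walk the sorted list left to right reading each weekday's count off as the length of its run.
import Mathlib
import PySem

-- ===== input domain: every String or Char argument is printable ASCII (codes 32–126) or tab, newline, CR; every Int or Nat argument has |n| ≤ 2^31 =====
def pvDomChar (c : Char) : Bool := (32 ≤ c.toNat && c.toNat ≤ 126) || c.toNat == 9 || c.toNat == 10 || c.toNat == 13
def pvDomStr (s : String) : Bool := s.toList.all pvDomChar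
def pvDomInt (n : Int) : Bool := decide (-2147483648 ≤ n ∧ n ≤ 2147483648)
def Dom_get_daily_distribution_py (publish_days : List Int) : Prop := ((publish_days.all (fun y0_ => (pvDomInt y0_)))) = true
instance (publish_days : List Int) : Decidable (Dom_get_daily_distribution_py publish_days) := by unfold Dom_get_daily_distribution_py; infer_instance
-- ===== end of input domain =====

-- B replaces A's Counter hash-count + per-name lookup by sort-then-linear-sweep: sort the
-- days once, then walk the sorted list with an index pointer, reading each weekday's count
-- off as the length of its run (objective: alternative).

def pvDayNames : List String := ["Monday","Tuesday","Wednesday","Thursday","Friday","Saturday","Sunday"]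

-- ===== PORT A =====
-- Counter(publish_days), then a loop over enumerate(day_names) inserting day_counts.get(i, 0).
def get_daily_distribution_py (publish_days : List Int) : List (String × Int) :=
  if publish_days = [] then []
  else
    let day_counts := PySem.Dict.counter publish_days
    ((PySem.List.enumerate pvDayNames).foldl
      (fun (dist : PySem.Dict String Int) p => dist.insert p.2 (day_counts.getD p.1 0))
      PySem.Dict.empty).items

-- ===== PORT B =====
-- while j < n and s[j] < i: j += 1
def pvSkipIdx (s : List Int) (i : Int) (j : Nat) : Nat :=
  if h : j < s.length then
    if s[j] < i then pvSkipIdx s i (j + 1) else j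
  else j
termination_by s.length - j
decreasing_by omega

-- while j < n and s[j] == i: j += 1
def pvRunEnd (s : List Int) (i : Int) (j : Nat) : Nat :=
  if h : j < s.length then
    if s[j] = i then pvRunEnd s i (j + 1) else j
  else j
termination_by s.length - j
decreasing_by omega

-- sorted(publish_days), then one sweep over enumerate(day_names) carrying (distribution, j).
def get_daily_distribution_py_alt (publish_days : List Int) : List (String × Int) :=
  if publish_days = [] then []
  else
    let s := PySem.List.sorted publish_days (fun x => x) false
    (((PySem.List.enumerate pvDayNames).foldl
      (fun (st : PySem.Dict String Int × Nat) p =>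
        let j1 := pvSkipIdx s p.1 st.2
        let j2 := pvRunEnd s p.1 j1
        (st.1.insert p.2 ((j2 - j1 : Nat) : Int), j2))
      (PySem.Dict.empty, 0)).1).items

-- ===== PRECONDITION & SPEC =====
def Spec_get_daily_distribution_py (publish_days : List Int) (out : List (String × Int)) : Prop := out = get_daily_distribution_py_alt publish_days
instance (publish_days : List Int) (out : List (String × Int)) : Decidable (Spec_get_daily_distribution_py publish_days out) := by unfold Spec_get_daily_distribution_py; infer_instance

-- ===== CLAIM (what is proved, stated in full; the proofs are below) =====
def Claim_equal_get_daily_distribution_py : Prop := ∀ (publish_days : List Int), Dom_get_daily_distribution_py publish_days → Spec_get_daily_distribution_py publish_days (get_daily_distribution_py publish_days)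

-- ===== LEMMAS AND PROOFS =====

-- Proof-side model of the skip loop: drop the leading elements below i.
def pvSkipLt (i : Int) : List Int → List Int
  | [] => []
  | d :: t => if d < i then pvSkipLt i t else d :: t

-- Proof-side model of the run loop: length of the leading run of i's.
def pvRunLen (i : Int) : List Int → Nat
  | [] => 0
  | d :: t => if d = i then pvRunLen i t + 1 else 0

-- Skipping below j after skipping below i ≤ j is skipping below j.
theorem pvSkipLt_skipLt (i j : Int) (h : i ≤ j) (s : List Int) :
    pvSkipLt j (pvSkipLt i s) = pvSkipLt j s := by
  induction s with
  | nil => rfl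
  | cons a t ih =>
    by_cases ha : a < i
    · simp [pvSkipLt, ha, ih, show a < j by omega]
    · simp [pvSkipLt, ha]

-- On a sorted list whose elements are all ≥ i, the front run of i's is the whole count of i,
-- and dropping it skips everything below i+1.
theorem pvRun_spec (i : Int) (r : List Int) (hr : r.Pairwise (· ≤ ·)) (hge : ∀ b ∈ r, i ≤ b) :
    ((pvRunLen i r : Int) = r.count i) ∧ r.drop (pvRunLen i r) = pvSkipLt (i + 1) r := by
  induction r with
  | nil => simp [pvRunLen, pvSkipLt]
  | cons b u ih =>
    rcases List.pairwise_cons.mp hr with ⟨hb, hu⟩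
    by_cases hbi : b = i
    · subst hbi
      have hgeu : ∀ c ∈ u, b ≤ c := hb
      obtain ⟨ih1, ih2⟩ := ih hu hgeu
      constructor
      · simp [pvRunLen, ih1]
      · simpa [pvRunLen, pvSkipLt, show b < b + 1 by omega] using ih2
    · have hlt : i < b := by have h1 := hge b (by simp); have h2 : b ≠ i := hbi; omega
      constructor
      · have : (b :: u).count i = 0 := by
          refine List.count_eq_zero.mpr ?_
          intro hmem
          rcases List.mem_cons.mp hmem with h | h
          · omega
          · have := hb i h; omega
        simp [pvRunLen, hbi, this]
      · simp [pvRunLen, pvSkipLt, hbi, show ¬ b < i + 1 by omega]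

-- Elements surviving pvSkipLt i on a sorted list are all ≥ i; the result stays sorted.
theorem pvSkipLt_sorted (i : Int) (s : List Int) (hs : s.Pairwise (· ≤ ·)) :
    (pvSkipLt i s).Pairwise (· ≤ ·) ∧ ∀ b ∈ pvSkipLt i s, i ≤ b := by
  induction s with
  | nil => simp [pvSkipLt]
  | cons a t ih =>
    rcases List.pairwise_cons.mp hs with ⟨ha, ht⟩
    by_cases hai : a < i
    · simpa [pvSkipLt, hai] using ih ht
    · refine ⟨by simpa [pvSkipLt, hai] using hs, ?_⟩
      intro b hb
      simp only [pvSkipLt, if_neg hai] at hb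
      rcases List.mem_cons.mp hb with h | h
      · omega
      · have := ha b h; omega

-- One sweep step on a sorted list s: the run measured after skipping below i is the count of i
-- in s, and the leftover is s with everything below i+1 skipped.
theorem pvStep (i : Int) (s : List Int) (hs : s.Pairwise (· ≤ ·)) :
    ((pvRunLen i (pvSkipLt i s) : Int) = s.count i) ∧
    (pvSkipLt i s).drop (pvRunLen i (pvSkipLt i s)) = pvSkipLt (i + 1) s := by
  obtain ⟨hsort, hge⟩ := pvSkipLt_sorted i s hs
  obtain ⟨h1, h2⟩ := pvRun_spec i (pvSkipLt i s) hsort hge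
  refine ⟨?_, by rw [h2, pvSkipLt_skipLt i (i+1) (by omega)]⟩
  rw [h1]
  -- count is unchanged by skipping elements < i (they are ≠ i)
  clear h1 h2 hsort hge
  induction s with
  | nil => rfl
  | cons a t ih =>
    rcases List.pairwise_cons.mp hs with ⟨_, ht⟩
    by_cases hai : a < i
    · simp [pvSkipLt, hai, ih ht, show ¬ a = i by omega]
    · simp [pvSkipLt, hai]

-- The index skip loop computes pvSkipLt on the remaining suffix.
theorem pvSkipIdx_spec (s : List Int) (i : Int) :
    ∀ m j, s.length - j = m → j ≤ s.length →
      j ≤ pvSkipIdx s i j ∧ pvSkipIdx s i j ≤ s.length ∧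
      s.drop (pvSkipIdx s i j) = pvSkipLt i (s.drop j) := by
  intro m
  induction m with
  | zero =>
    intro j hm hj
    have hjl : j = s.length := by omega
    unfold pvSkipIdx
    simp [hjl, pvSkipLt]
  | succ n ih =>
    intro j hm hj
    have hjl : j < s.length := by omega
    rw [List.drop_eq_getElem_cons hjl]
    unfold pvSkipIdx
    rw [dif_pos hjl]
    by_cases hlt : s[j] < i
    · rw [if_pos hlt]
      obtain ⟨a, b, c⟩ := ih (j + 1) (by omega) (by omega)
      exact ⟨by omega, b, by rw [c]; simp [pvSkipLt, hlt]⟩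
    · rw [if_neg hlt]
      exact ⟨le_rfl, by omega, by rw [List.drop_eq_getElem_cons hjl]; simp [pvSkipLt, hlt]⟩

-- The index run loop advances by exactly pvRunLen on the remaining suffix.
theorem pvRunEnd_spec (s : List Int) (i : Int) :
    ∀ m j, s.length - j = m → j ≤ s.length →
      pvRunEnd s i j = j + pvRunLen i (s.drop j) ∧ pvRunEnd s i j ≤ s.length := by
  intro m
  induction m with
  | zero =>
    intro j hm hj
    have hjl : j = s.length := by omega
    unfold pvRunEnd
    simp [hjl, pvRunLen]
  | succ n ih =>
    intro j hm hj
    have hjl : j < s.length := by omega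
    have hdrop := List.drop_eq_getElem_cons hjl
    unfold pvRunEnd
    rw [dif_pos hjl]
    by_cases heq : s[j] = i
    · rw [if_pos heq]
      obtain ⟨a, b⟩ := ih (j + 1) (by omega) (by omega)
      rw [hdrop]
      exact ⟨by rw [a]; simp [pvRunLen, heq]; omega, b⟩
    · rw [if_neg heq]
      rw [hdrop]
      simp [pvRunLen, heq]; omega

-- One step of B's sweep, stated on the index state: the inserted value is s.count i,
-- and the new pointer again satisfies the sweep invariant for the next weekday i'.
theorem pvIdxStep (s : List Int) (hs : s.Pairwise (· ≤ ·)) (i i' : Int) (hii : i' = i + 1)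
    (j : Nat) (hj : j ≤ s.length) (hidx : pvSkipLt i (s.drop j) = pvSkipLt i s) :
    ((pvRunEnd s i (pvSkipIdx s i j) - pvSkipIdx s i j : Nat) : Int) = s.count i ∧
    pvRunEnd s i (pvSkipIdx s i j) ≤ s.length ∧
    pvSkipLt i' (s.drop (pvRunEnd s i (pvSkipIdx s i j))) = pvSkipLt i' s := by
  obtain ⟨hle1, hb1, hd1⟩ := pvSkipIdx_spec s i (s.length - j) j rfl hj
  have hd1' : s.drop (pvSkipIdx s i j) = pvSkipLt i s := hd1.trans hidx
  obtain ⟨hre, hb2⟩ := pvRunEnd_spec s i (s.length - pvSkipIdx s i j) (pvSkipIdx s i j) rfl hb1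
  rw [hd1'] at hre
  obtain ⟨hc, hdrop⟩ := pvStep i s hs
  refine ⟨?_, hb2, ?_⟩
  · rw [show pvRunEnd s i (pvSkipIdx s i j) - pvSkipIdx s i j = pvRunLen i (pvSkipLt i s) by omega]
    exact hc
  · have : s.drop (pvRunEnd s i (pvSkipIdx s i j)) = pvSkipLt (i + 1) s := by
      rw [hre, ← List.drop_drop, hd1', hdrop]
    rw [this, hii, pvSkipLt_skipLt (i + 1) (i + 1) le_rfl]

-- ===== VERDICT (by name: the statement is the Claim_ definition above) =====
theorem get_daily_distribution_py_spec : Claim_equal_get_daily_distribution_py := by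
  intro xs _
  unfold Spec_get_daily_distribution_py get_daily_distribution_py get_daily_distribution_py_alt
  split
  · rfl
  · set s := PySem.List.sorted xs (fun x => x) false with hsdef
    have hs : s.Pairwise (· ≤ ·) := by
      simpa using PySem.List.sorted_pairwise xs (fun x => x)
    have hperm : s.Perm xs := PySem.List.sorted_perm xs (fun x => x) false
    have hcnt : ∀ i : Int, s.count i = xs.count i := fun i => hperm.count_eq i
    obtain ⟨c0, b0, d0⟩ := pvIdxStep s hs 0 1 (by norm_num) 0 (by simp) (by simp)
    obtain ⟨c1, b1, d1⟩ := pvIdxStep s hs 1 2 (by norm_num) _ b0 d0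
    obtain ⟨c2, b2, d2⟩ := pvIdxStep s hs 2 3 (by norm_num) _ b1 d1
    obtain ⟨c3, b3, d3⟩ := pvIdxStep s hs 3 4 (by norm_num) _ b2 d2
    obtain ⟨c4, b4, d4⟩ := pvIdxStep s hs 4 5 (by norm_num) _ b3 d3
    obtain ⟨c5, b5, d5⟩ := pvIdxStep s hs 5 6 (by norm_num) _ b4 d4
    obtain ⟨c6, _, _⟩ := pvIdxStep s hs 6 7 (by norm_num) _ b5 d5
    simp only [pvDayNames, PySem.List.enumerate_cons, PySem.List.enumerate_nil,
      List.foldl_cons, List.foldl_nil]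
    simp only [show (0:Int)+1 = 1 from rfl, show (1:Int)+1 = 2 from rfl,
      show (2:Int)+1 = 3 from rfl, show (3:Int)+1 = 4 from rfl,
      show (4:Int)+1 = 5 from rfl, show (5:Int)+1 = 6 from rfl]
    simp only [c0, c1, c2, c3, c4, c5, c6, hcnt]
    simp [PySem.Dict.getD_counter]
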